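-- pv_equiv track=rewrite | github.com/krscott/aoc-py | 2022/03b.py | priority_of_common_item
-- ===== SOURCE A (Python) =====
-- def priority(char: str) -> int:
--     assert len(char) == 1
--     if 'a' <= char <= 'z':
--         return ord(char) - ord('a') + 1
--     if 'A' <= char <= 'Z':
--         return ord(char) - ord('A') + 27
--     assert False
--
-- def priority_of_common_item(rucksacks: list[str]) -> int:
--     common_set = None
--
--     for s in rucksacks:
--         s = s.strip()
--
--         if common_set is None:
--             common_set = set(s)
--         else:
--             common_set = common_set.intersection(s)
--
--     assert common_set and len(common_set) == 1
--
--     return priority(list(common_set)[0])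
-- ===== SOURCE B (Python) =====
-- def priority_of_common_item(rucksacks: list[str]) -> int:
--     # Presence table: how many rucksacks contain each character.
--     counts: dict[str, int] = {}
--     for s in rucksacks:
--         for c in set(s.strip()):
--             counts[c] = counts.get(c, 0) + 1
--     n = len(rucksacks)
--     candidates = [c for c, k in counts.items() if k == n]
--     assert len(candidates) == 1
--     o = ord(candidates[0])
--     if 97 <= o <= 122:
--         return o - 96
--     assert 65 <= o <= 90
--     return o - 38
-- ===== Notes on version B (the rewrite author's own statement) =====
-- stated objective: idiomatic
-- what changed: Replaces the shrinking fold of set intersections by a global presence counter (one dict of how many rucksacks contain each character) followed by a single filtering pass for characters whose count equals the number of rucksacks; Pre_ excludes only inputs where A raises AssertionError (no unique common ASCII-letter item), where B raises too.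
import Mathlib
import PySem

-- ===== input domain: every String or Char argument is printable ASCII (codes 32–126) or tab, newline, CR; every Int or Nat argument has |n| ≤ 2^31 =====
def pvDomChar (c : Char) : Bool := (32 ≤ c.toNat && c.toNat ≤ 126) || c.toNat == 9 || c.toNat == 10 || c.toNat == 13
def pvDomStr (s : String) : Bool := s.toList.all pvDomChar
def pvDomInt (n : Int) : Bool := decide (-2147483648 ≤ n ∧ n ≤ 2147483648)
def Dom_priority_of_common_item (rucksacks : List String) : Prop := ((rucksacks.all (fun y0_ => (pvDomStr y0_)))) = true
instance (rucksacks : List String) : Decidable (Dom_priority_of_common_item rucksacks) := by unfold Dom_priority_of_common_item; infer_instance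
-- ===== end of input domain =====

-- B replaces A's fold of set intersections by a global presence counter plus one
-- filtering pass (idiomatic, same cost); return values proved equal on Pre_.

-- ===== PORT A =====
-- priority(char): the two assert branches are unreachable under Pre_ (the common
-- item is a single ASCII letter there); the port returns 0 where Python raises.
def pvPriorityA (c : Char) : Int :=
  if 'a' ≤ c ∧ c ≤ 'z' then (c.toNat : Int) - ('a'.toNat : Int) + 1
  else if 'A' ≤ c ∧ c ≤ 'Z' then (c.toNat : Int) - ('A'.toNat : Int) + 27
  else 0  -- assert False (AssertionError): excluded by Pre_

def priority_of_common_item (rucksacks : List String) : Int :=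
  let common : Option (PySem.Set Char) :=
    rucksacks.foldl (fun acc s =>
      let t := PySem.Str.strip s
      match acc with
      | none => some (PySem.Set.ofList t.toList)
      | some cs => some (PySem.Set.inter cs t.toList)) none
  match common with
  | some [c] => pvPriorityA c           -- assert passes; list(common_set)[0]
  | _ => 0                              -- assert fails (AssertionError): excluded by Pre_

-- ===== PORT B =====
def priority_of_common_item_alt (rucksacks : List String) : Int :=
  let counts : PySem.Dict Char Int :=
    rucksacks.foldl (fun d s =>
      (PySem.Set.ofList (PySem.Str.strip s).toList).foldl
        (fun d c => d.insert c (d.getD c 0 + 1)) d)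
      PySem.Dict.empty
  let n : Int := rucksacks.length
  let candidates := (counts.items.filter (fun p => p.2 == n)).map Prod.fst
  if candidates.length = 1 then       -- assert len(candidates) == 1
    let o : Int := (candidates.headD ' ').toNat   -- ord(candidates[0]); the default is unreachable
    if 97 ≤ o ∧ o ≤ 122 then o - 96
    else if 65 ≤ o ∧ o ≤ 90 then o - 38
    else 0                              -- assert 65 <= o <= 90 fails (AssertionError): excluded by Pre_
  else 0                                -- assert fails (AssertionError): excluded by Pre_

-- ===== PRECONDITION & SPEC =====
def pvStripChars (s : String) : List Char := (PySem.Str.strip s).toList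

-- characters common to all stripped rucksacks (in first-rucksack order)
def pvCommonChars (rucksacks : List String) : List Char :=
  (PySem.List.dedup (pvStripChars (rucksacks.headD ""))).filter
    (fun c => rucksacks.all (fun s => (pvStripChars s).contains c))

def pvIsLetter (c : Char) : Bool :=
  decide (('a' ≤ c ∧ c ≤ 'z') ∨ ('A' ≤ c ∧ c ≤ 'Z'))

-- Pre_ excludes exactly the inputs where A raises AssertionError: no rucksacks,
-- no unique character common to every stripped rucksack, or a common item that
-- is not an ASCII letter (then priority's 'assert False' fires).  B raises there too.
def Pre_priority_of_common_item (rucksacks : List String) : Prop :=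
  rucksacks ≠ [] ∧ (pvCommonChars rucksacks).length = 1 ∧
    (pvCommonChars rucksacks).all pvIsLetter = true
instance (rucksacks : List String) : Decidable (Pre_priority_of_common_item rucksacks) := by
  unfold Pre_priority_of_common_item; infer_instance

def pvWitness_priority_of_common_item : List String := ["ab", "cb", "zbz"]

def Spec_priority_of_common_item (rucksacks : List String) (out : Int) : Prop := out = priority_of_common_item_alt rucksacks
instance (rucksacks : List String) (out : Int) : Decidable (Spec_priority_of_common_item rucksacks out) := by unfold Spec_priority_of_common_item; infer_instance

-- ===== CLAIM (what is proved, stated in full; the proofs are below) =====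
def Claim_equal_priority_of_common_item : Prop := ∀ (rucksacks : List String), Dom_priority_of_common_item rucksacks → Pre_priority_of_common_item rucksacks → Spec_priority_of_common_item rucksacks (priority_of_common_item rucksacks)

-- ===== LEMMAS AND PROOFS =====

-- A's fold over the tail, characterised as one filter over the initial set
theorem pvFoldA_char (rs : List String) (init : PySem.Set Char) :
    rs.foldl (fun acc s =>
      let t := PySem.Str.strip s
      match acc with
      | none => some (PySem.Set.ofList t.toList)
      | some cs => some (PySem.Set.inter cs t.toList)) (some init)
    = some (init.filter (fun c => rs.all (fun s => (pvStripChars s).contains c))) := by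
  induction rs generalizing init with
  | nil => simp
  | cons s rs ih =>
    simp only [List.foldl_cons, List.all_cons]
    rw [ih]
    congr 1
    show (PySem.Set.inter init (PySem.Str.strip s).toList).filter _ = _
    have : PySem.Set.inter init (PySem.Str.strip s).toList
        = init.filter (fun c => (pvStripChars s).contains c) := rfl
    rw [this, List.filter_filter]
    exact List.filter_congr (fun c _ => by simp [Bool.and_comm])

-- a nodup list whose members are exactly {c} is [c]
theorem pvNodupSingleton {c : Char} (m : List Char) (hn : m.Nodup)
    (hm : ∀ x, x ∈ m ↔ x = c) : m = [c] := by
  cases m with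
  | nil => exact absurd ((hm c).2 rfl) (by simp)
  | cons y t =>
    have hy : y = c := (hm y).1 (by simp)
    subst hy
    have : t = [] := by
      cases t with
      | nil => rfl
      | cons z t' =>
        have hz : z = y := (hm z).1 (by simp)
        simp [hz] at hn
    simp [this]

-- the two priority computations agree on every character
theorem pvPrioEq (c : Char) :
    pvPriorityA c = (if 97 ≤ (c.toNat : Int) ∧ (c.toNat : Int) ≤ 122 then (c.toNat : Int) - 96
      else if 65 ≤ (c.toNat : Int) ∧ (c.toNat : Int) ≤ 90 then (c.toNat : Int) - 38 else 0) := by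
  have hl : ('a' ≤ c ∧ c ≤ 'z') ↔ 97 ≤ (c.toNat : Int) ∧ (c.toNat : Int) ≤ 122 := by
    rw [Char.le_def, Char.le_def, UInt32.le_iff_toNat_le, UInt32.le_iff_toNat_le]
    show (97 ≤ c.toNat ∧ c.toNat ≤ 122) ↔ _
    omega
  have hu : ('A' ≤ c ∧ c ≤ 'Z') ↔ 65 ≤ (c.toNat : Int) ∧ (c.toNat : Int) ≤ 90 := by
    rw [Char.le_def, Char.le_def, UInt32.le_iff_toNat_le, UInt32.le_iff_toNat_le]
    show (65 ≤ c.toNat ∧ c.toNat ≤ 90) ↔ _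
    omega
  have ha : ('a'.toNat : Int) = 97 := by decide
  have hA : ('A'.toNat : Int) = 65 := by decide
  unfold pvPriorityA
  simp only [hl, hu, ha, hA]
  split_ifs <;> omega

theorem pvCount_common (rucksacks : List String) (c : Char) :
    (rucksacks.flatMap (fun s => PySem.Set.ofList (pvStripChars s))).count c
      = rucksacks.countP (fun s => (pvStripChars s).contains c) := by
  rw [List.count_flatMap]
  induction rucksacks with
  | nil => simp
  | cons s rs ih =>
    simp only [List.map_cons, List.sum_cons, List.countP_cons, ih, Function.comp]
    have : List.count c (PySem.Set.ofList (pvStripChars s))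
        = if (pvStripChars s).contains c then 1 else 0 := by
      rw [List.Nodup.count (PySem.Set.nodup_ofList _)]
      simp [PySem.Set.mem_ofList]
    rw [this]
    split_ifs <;> simp_all
    omega

-- ===== VERDICT (by name: the statement is the Claim_ definition above) =====
theorem priority_of_common_item_spec : Claim_equal_priority_of_common_item := by
  intro rucksacks _ hpre
  obtain ⟨hne, hlen, hall⟩ := hpre
  -- name the unique common character
  obtain ⟨c, hc⟩ : ∃ c, pvCommonChars rucksacks = [c] := by
    cases h : pvCommonChars rucksacks with
    | nil => rw [h] at hlen; simp at hlen
    | cons x t =>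
      rw [h] at hlen; simp at hlen
      refine ⟨x, ?_⟩
      rw [hlen]
  have hletter : pvIsLetter c = true := by
    rw [hc] at hall; simpa using hall
  obtain ⟨r0, rs, rfl⟩ : ∃ r0 rs, rucksacks = r0 :: rs := by
    cases rucksacks with
    | nil => exact absurd rfl hne
    | cons a b => exact ⟨a, b, rfl⟩
  -- "x is common to all rucksacks" ↔ x = c
  have hcommon : ∀ x : Char,
      ((r0 :: rs).all (fun s => (pvStripChars s).contains x) = true) ↔ x = c := by
    intro x
    have hmem : x ∈ pvCommonChars (r0 :: rs) ↔
        (r0 :: rs).all (fun s => (pvStripChars s).contains x) = true := by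
      unfold pvCommonChars
      simp only [List.mem_filter, List.headD_cons, PySem.List.mem_dedup]
      constructor
      · exact fun h => h.2
      · intro h
        refine ⟨?_, h⟩
        simp only [List.all_cons, Bool.and_eq_true] at h
        simpa [List.contains_iff_mem] using h.1
    rw [hc] at hmem
    simp only [List.mem_singleton] at hmem
    exact hmem.symm
  -- A's side
  unfold Spec_priority_of_common_item priority_of_common_item
  simp only [List.foldl_cons]
  rw [pvFoldA_char]
  have hA : (PySem.Set.ofList (PySem.Str.strip r0).toList).filter
      (fun x => rs.all (fun s => (pvStripChars s).contains x)) = [c] := by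
    apply pvNodupSingleton _ ((PySem.Set.nodup_ofList _).filter _)
    intro x
    rw [List.mem_filter, PySem.Set.mem_ofList, ← hcommon x]
    simp [pvStripChars, List.all_cons]
  rw [hA]
  -- B's side
  unfold priority_of_common_item_alt
  simp only
  rw [show (fun (d : PySem.Dict Char Int) (s : String) =>
        (PySem.Set.ofList (PySem.Str.strip s).toList).foldl
          (fun d c => d.insert c (d.getD c 0 + 1)) d)
      = (fun d s => List.foldl (fun d c => d.insert c (d.getD c 0 + 1)) d
          (PySem.Set.ofList (pvStripChars s))) from rfl,
    ← List.foldl_flatMap, PySem.Dict.foldl_insert_getD_add_one_eq_counter,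
    PySem.Dict.items_counter, List.filter_map, List.map_map]
  have hB : ((PySem.Set.ofList ((r0 :: rs).flatMap (fun s => PySem.Set.ofList (pvStripChars s)))).filter
      ((fun p : Char × Int => p.2 == ((r0 :: rs).length : Int)) ∘ (fun k => (k, ((List.count k ((r0 :: rs).flatMap (fun s => PySem.Set.ofList (pvStripChars s)))) : Int))))) = [c] := by
    apply pvNodupSingleton _ ((PySem.Set.nodup_ofList _).filter _)
    intro x
    rw [List.mem_filter, PySem.Set.mem_ofList, ← hcommon x]
    simp only [Function.comp, beq_iff_eq, pvCount_common, Nat.cast_inj]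
    constructor
    · rintro ⟨-, hcnt⟩
      exact List.all_eq_true.2 ((List.countP_eq_length).1 (by exact_mod_cast hcnt))
    · intro h
      have hall' := (List.all_eq_true).1 h
      refine ⟨?_, ?_⟩
      · refine List.mem_flatMap.2 ⟨r0, by simp, ?_⟩
        rw [PySem.Set.mem_ofList]
        have := hall' r0 (by simp)
        simpa [List.contains_iff_mem] using this
      · exact_mod_cast (List.countP_eq_length).2 (fun s hs => hall' s hs)
  rw [hB]
  exact pvPrioEq c
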